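-- pv_equiv track=rewrite | github.com/daniel-reich/ubiquitous-fiesta | HzeTvQqnH2afZs6GY_8.py | generate_rug
-- ===== SOURCE A (Python) =====
-- def generate_rug(n, direction):
--   x=n
--   a=[]
--   o=[]
--   v=0
--   y=direction
--   for i in range(x):
--     for i in range(x):
--       o.append(abs(i-v))
--     v+=1
--     if y=='left':
--       a.append(o)
--     else:
--       a.append(o[::-1])
--     o=[]
--   return(a)
-- ===== SOURCE B (Python) =====
-- def generate_rug(n, direction):
--     result = []
--     for v in range(n):
--         row = list(range(v, 0, -1)) + list(range(0, n - v))
--         result.append(row if direction == 'left' else row[::-1])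
--     return result
-- ===== Notes on version B (the rewrite author's own statement) =====
-- stated objective: simpler
-- what changed: Each row is built directly as two concatenated ranges [v..1] + [0..n-v-1] instead of an inner per-cell loop computing abs(i-v) for every cell.
import Mathlib
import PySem

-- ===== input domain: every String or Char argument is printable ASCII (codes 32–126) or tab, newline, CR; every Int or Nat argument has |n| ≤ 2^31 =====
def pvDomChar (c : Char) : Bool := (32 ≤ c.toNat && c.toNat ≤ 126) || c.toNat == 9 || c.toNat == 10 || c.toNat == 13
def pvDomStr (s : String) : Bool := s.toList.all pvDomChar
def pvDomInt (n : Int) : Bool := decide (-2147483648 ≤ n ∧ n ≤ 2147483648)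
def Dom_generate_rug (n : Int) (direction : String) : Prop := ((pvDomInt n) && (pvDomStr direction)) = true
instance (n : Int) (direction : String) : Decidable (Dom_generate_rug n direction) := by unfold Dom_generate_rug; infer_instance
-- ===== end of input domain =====

-- B builds each row from two concatenated range segments instead of an inner per-cell abs loop (simpler decomposition).

-- ===== PORT A =====
def generate_rug (n : Int) (direction : String) : List (List Int) :=
  let x := n
  let y := direction
  ((PySem.List.pyRange 0 x 1).foldl
    (fun (st : List (List Int) × Int) _i =>
      let o := (PySem.List.pyRange 0 x 1).foldl (fun o i => o ++ [|i - st.2|]) []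
      let v := st.2 + 1
      if y == "left" then (st.1 ++ [o], v) else (st.1 ++ [o.reverse], v))
    ([], 0)).1

-- ===== PORT B =====
def generate_rug_alt (n : Int) (direction : String) : List (List Int) :=
  (PySem.List.pyRange 0 n 1).foldl
    (fun acc v =>
      let row := PySem.List.pyRange v 0 (-1) ++ PySem.List.pyRange 0 (n - v) 1
      acc ++ [if direction == "left" then row else row.reverse])
    []

-- ===== PRECONDITION & SPEC =====
def Spec_generate_rug (n : Int) (direction : String) (out : List (List Int)) : Prop := out = generate_rug_alt n direction
instance (n : Int) (direction : String) (out : List (List Int)) : Decidable (Spec_generate_rug n direction out) := by unfold Spec_generate_rug; infer_instance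

-- ===== CLAIM (what is proved, stated in full; the proofs are below) =====
def Claim_equal_generate_rug : Prop := ∀ (n : Int) (direction : String), Dom_generate_rug n direction → Spec_generate_rug n direction (generate_rug n direction)

-- ===== LEMMAS AND PROOFS =====

theorem foldl_append_singleton {α β : Type} (f : α → β) :
    ∀ (l : List α) (acc : List β), l.foldl (fun o i => o ++ [f i]) acc = acc ++ l.map f := by
  intro l
  induction l with
  | nil => simp
  | cons a t ih => intro acc; simp [List.foldl, ih]

-- the inner loop of A equals the mapped abs row
theorem rowA_eq_map (n v : Int) :
    (PySem.List.pyRange 0 n 1).foldl (fun o i => o ++ [|i - v|]) []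
      = (PySem.List.pyRange 0 n 1).map (fun i => |i - v|) := by
  simpa using foldl_append_singleton (fun i => |i - v|) (PySem.List.pyRange 0 n 1) []

-- the abs row equals B's two range segments, for 0 ≤ v ≤ n
theorem row_eq (n v : Int) (h0 : 0 ≤ v) (h1 : v ≤ n) :
    (PySem.List.pyRange 0 n 1).map (fun i => |i - v|)
      = PySem.List.pyRange v 0 (-1) ++ PySem.List.pyRange 0 (n - v) 1 := by
  rw [PySem.List.pyRange_one_append 0 v n h0 h1, List.map_append,
      PySem.List.pyRange_one 0 v, PySem.List.pyRange_neg_one v 0,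
      PySem.List.pyRange_one v n, PySem.List.pyRange_one 0 (n - v)]
  simp only [sub_zero, List.map_map]
  congr 1
  · apply List.map_congr_left
    intro k hk
    simp only [List.mem_range] at hk
    have hkv : (k : Int) < v := by omega
    simp only [Function.comp]
    rw [show (0 : Int) + k - v = -(v - k) by ring, abs_neg, abs_of_nonneg (by omega)]
  · apply List.map_congr_left
    intro k _
    simp only [Function.comp]
    rw [show v + (k : Int) - v = (k : Int) by ring, abs_of_nonneg (by positivity)]
    omega

-- the per-row value both sides agree on
theorem step_row_eq (n : Int) (direction : String) (v : Int) (h0 : 0 ≤ v) (h1 : v ≤ n) :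
    (if direction == "left"
      then (PySem.List.pyRange 0 n 1).foldl (fun o i => o ++ [|i - v|]) []
      else ((PySem.List.pyRange 0 n 1).foldl (fun o i => o ++ [|i - v|]) []).reverse)
      = (if direction == "left"
          then PySem.List.pyRange v 0 (-1) ++ PySem.List.pyRange 0 (n - v) 1
          else (PySem.List.pyRange v 0 (-1) ++ PySem.List.pyRange 0 (n - v) 1).reverse) := by
  rw [rowA_eq_map, row_eq n v h0 h1]

-- A's outer loop, with its counter state, produces exactly B's fold over the remaining range
theorem loopA_eq (n : Int) (direction : String) :
    ∀ (k : Nat) (v : Int) (acc : List (List Int)), 0 ≤ v → k = (n - v).toNat →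
    ((PySem.List.pyRange v n 1).foldl
      (fun (st : List (List Int) × Int) (_i : Int) =>
        (st.1 ++ [if direction == "left"
                    then (PySem.List.pyRange 0 n 1).foldl (fun o i => o ++ [|i - st.2|]) []
                    else ((PySem.List.pyRange 0 n 1).foldl (fun o i => o ++ [|i - st.2|]) []).reverse],
         st.2 + 1))
      (acc, v)).1
    = (PySem.List.pyRange v n 1).foldl
        (fun acc v =>
          acc ++ [if direction == "left"
                    then PySem.List.pyRange v 0 (-1) ++ PySem.List.pyRange 0 (n - v) 1
                    else (PySem.List.pyRange v 0 (-1) ++ PySem.List.pyRange 0 (n - v) 1).reverse])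
        acc := by
  intro k
  induction k with
  | zero =>
    intro v acc h0 hk
    have hnv : n ≤ v := by omega
    rw [PySem.List.pyRange_one_eq_nil hnv]
    rfl
  | succ m ih =>
    intro v acc h0 hk
    have hvn : v < n := by omega
    rw [PySem.List.pyRange_one_cons hvn]
    simp only [List.foldl_cons]
    rw [step_row_eq n direction v h0 (le_of_lt hvn)]
    exact ih (v + 1) _ (by omega) (by omega)

-- ===== VERDICT (by name: the statement is the Claim_ definition above) =====
theorem generate_rug_spec : Claim_equal_generate_rug := by
  intro n direction _
  unfold Spec_generate_rug
  show generate_rug n direction = generate_rug_alt n direction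
  simp only [generate_rug, generate_rug_alt]
  have hfun :
      (fun (st : List (List Int) × Int) (_i : Int) =>
        let o := (PySem.List.pyRange 0 n 1).foldl (fun o i => o ++ [|i - st.2|]) []
        let v := st.2 + 1
        if direction == "left" then (st.1 ++ [o], v) else (st.1 ++ [o.reverse], v))
      = (fun (st : List (List Int) × Int) (_i : Int) =>
          (st.1 ++ [if direction == "left"
                      then (PySem.List.pyRange 0 n 1).foldl (fun o i => o ++ [|i - st.2|]) []
                      else ((PySem.List.pyRange 0 n 1).foldl (fun o i => o ++ [|i - st.2|]) []).reverse],
           st.2 + 1)) := by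
    funext st i
    by_cases h : direction == "left" <;> simp [h]
  have hfun2 :
      (fun (acc : List (List Int)) (v : Int) =>
        let row := PySem.List.pyRange v 0 (-1) ++ PySem.List.pyRange 0 (n - v) 1
        acc ++ [if direction == "left" then row else row.reverse])
      = (fun (acc : List (List Int)) (v : Int) =>
          acc ++ [if direction == "left"
                    then PySem.List.pyRange v 0 (-1) ++ PySem.List.pyRange 0 (n - v) 1
                    else (PySem.List.pyRange v 0 (-1) ++ PySem.List.pyRange 0 (n - v) 1).reverse]) := rfl
  rw [hfun, hfun2]
  exact loopA_eq n direction (n - 0).toNat 0 [] le_rfl rfl
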